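-- pv_equiv track=rewrite | github.com/KennethEnevoldsen/augmenty | augmenty/spans/person.py | handle_orth
-- ===== SOURCE A (Python) =====
-- from typing import Callable, Dict, Iterator, List, Optional
--
-- def handle_orth(
--     values: List[str], aug_ents: List[List[str]], entity_slices: List[tuple]
-- ) -> List[str]:
--     """replace original entity with augmented entity"""
--     running_add = 0
--     for i, s in enumerate(entity_slices):
--         values[slice(s[0] + running_add, s[1] + running_add)] = aug_ents[i]
--         running_add += len(aug_ents[i]) - (s[1] - s[0])
--     return values
-- ===== SOURCE B (Python) =====
-- from typing import List
--
--
-- def handle_orth(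
--     values: List[str], aug_ents: List[List[str]], entity_slices: List[tuple]
-- ) -> List[str]:
--     """Replace entity spans with their augmented spans.
--
--     The working sequence is kept as a piece table (a list of segments): each
--     replacement splits at most two segments instead of rebuilding the whole
--     list, and the segments are concatenated once at the end.  Slice bounds are
--     normalised with the standard slice.indices().  Does not mutate `values`.
--     """
--     pieces = [values]
--     length = len(values)
--     shift = 0
--     for ent, s in zip(aug_ents, entity_slices):
--         a, stop, _ = slice(s[0] + shift, s[1] + shift).indices(length)
--         b = max(a, stop)
--         length += len(ent) - (b - a)
--         shift += len(ent) - (s[1] - s[0])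
--         new, placed = [], False
--         x, y = a, b
--         for p in pieces:
--             if x >= len(p):          # segment entirely before the replaced range
--                 new.append(p)
--             else:
--                 if x > 0:
--                     new.append(p[:x])
--                 if not placed:
--                     new.append(ent)
--                     placed = True
--                 if y < len(p):
--                     new.append(p[y:] if y > 0 else p)
--             x = max(x - len(p), 0)
--             y = max(y - len(p), 0)
--         if not placed:
--             new.append(ent)
--         pieces = new
--     out = []
--     for p in pieces:
--         out.extend(p)
--     return out
-- ===== Notes on version B (the rewrite author's own statement) =====
-- stated objective: alternative
-- what changed: Instead of repeatedly splicing each augmented entity into the full list with offset-corrected slice assignment (rebuilding the whole list each iteration), B keeps the working sequence as a piece table (a list of segments), normalises each slice's bounds with the standard slice.indices(), splits segments around the replaced range, and concatenates the segments once at the end; it also does not mutate `values`. Pre_ excludes only inputs on which A raises IndexError (a slice with fewer than two entries, or more slices than augmented entities).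
import Mathlib
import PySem

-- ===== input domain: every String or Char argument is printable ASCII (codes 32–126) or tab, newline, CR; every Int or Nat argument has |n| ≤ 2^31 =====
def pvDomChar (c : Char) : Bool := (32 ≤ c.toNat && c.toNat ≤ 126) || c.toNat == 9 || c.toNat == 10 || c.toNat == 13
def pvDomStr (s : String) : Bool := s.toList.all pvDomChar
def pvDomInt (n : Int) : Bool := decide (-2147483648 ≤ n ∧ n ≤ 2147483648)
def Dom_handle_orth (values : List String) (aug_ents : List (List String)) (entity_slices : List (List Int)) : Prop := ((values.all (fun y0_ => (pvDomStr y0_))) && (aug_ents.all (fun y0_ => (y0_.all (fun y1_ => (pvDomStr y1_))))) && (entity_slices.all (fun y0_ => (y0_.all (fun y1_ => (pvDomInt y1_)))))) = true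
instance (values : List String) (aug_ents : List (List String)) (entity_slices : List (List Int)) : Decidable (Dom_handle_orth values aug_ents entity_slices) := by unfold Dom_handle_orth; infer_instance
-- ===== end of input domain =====

-- B keeps the working sequence as a piece table (list of segments), normalises slice
-- bounds with slice.indices(), and splices each replacement by splitting segments,
-- concatenating once at the end, instead of A's repeated whole-list slice assignments.
-- A mutates its `values` argument in place; B does not — the equivalence proved here is
-- about the RETURN value only.


-- ===== PORT A =====
-- exact Python list slice assignment xs[a:b] = repl (step 1): both bounds clamped to
-- [0, len] (negative counts from the end), the stop bound never before the start bound
def pySliceAssign (xs : List String) (a b : Int) (repl : List String) : List String :=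
  xs.take (PySem.List.clampIdx xs.length a) ++ repl ++
    xs.drop (max (PySem.List.clampIdx xs.length a) (PySem.List.clampIdx xs.length b))

-- the `for i, s in enumerate(entity_slices)` loop: state = (values, running_add), counter i
def handleOrthGo (aug_ents : List (List String)) :
    List (List Int) → Nat → List String → Int → List String
  | [], _, vals, _ => vals
  | s :: rest, i, vals, ra =>
    let a := (PySem.List.pyGet? s 0).getD 0
    let b := (PySem.List.pyGet? s 1).getD 0
    let ent := (PySem.List.pyGet? aug_ents (i : Int)).getD []
    handleOrthGo aug_ents rest (i + 1)
      (pySliceAssign vals (a + ra) (b + ra) ent)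
      (ra + (ent.length : Int) - (b - a))

def handle_orth (values : List String) (aug_ents : List (List String)) (entity_slices : List (List Int)) : List String :=
  handleOrthGo aug_ents entity_slices 0 values 0

-- ===== PORT B =====
-- Source B's inner `for p in pieces` loop: splice `ent` into the piece table between
-- positions x and y (x, y are decremented by each piece's length, floored at 0)
def pvSpliceGo (ent : List String) :
    List (List String) → Int → Int → Bool → List (List String)
  | [], _, _, placed => if placed then [] else [ent]
  | p :: rest, x, y, placed =>
    if (p.length : Int) ≤ x then
      p :: pvSpliceGo ent rest (max (x - p.length) 0) (max (y - p.length) 0) placed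
    else
      ((if 0 < x then [PySem.List.slice p none (some x)] else []) ++
        (if placed then [] else [ent]) ++
        (if y < (p.length : Int) then
          [if 0 < y then PySem.List.slice p (some y) none else p] else []))
        ++ pvSpliceGo ent rest (max (x - p.length) 0) (max (y - p.length) 0) true

-- Source B's outer `for ent, s in zip(aug_ents, entity_slices)` loop:
-- state = (pieces, length, shift).  `slice(lo, hi).indices(length)` (step 1) is exactly
-- PySem.List.clampIdx on each bound.
def handleOrthAltGo :
    List (List String × List Int) → List (List String) → Int → Int → List (List String)
  | [], pieces, _, _ => pieces
  | (ent, s) :: rest, pieces, length, shift =>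
    let lo := (PySem.List.pyGet? s 0).getD 0 + shift
    let hi := (PySem.List.pyGet? s 1).getD 0 + shift
    let a := ((PySem.List.clampIdx length.toNat lo : Nat) : Int)
    let stop := ((PySem.List.clampIdx length.toNat hi : Nat) : Int)
    let b := max a stop
    handleOrthAltGo rest (pvSpliceGo ent pieces a b false)
      (length + (ent.length : Int) - (b - a))
      (shift + (ent.length : Int) - ((PySem.List.pyGet? s 1).getD 0 - (PySem.List.pyGet? s 0).getD 0))

def handle_orth_alt (values : List String) (aug_ents : List (List String)) (entity_slices : List (List Int)) : List String :=
  (handleOrthAltGo (aug_ents.zip entity_slices) [values] (values.length : Int) 0).foldl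
    (fun acc p => acc ++ p) []

-- ===== PRECONDITION & SPEC =====
-- Pre_ excludes exactly the inputs on which A raises IndexError: a slice with fewer than
-- two entries, or more slices than augmented entities.
def Pre_handle_orth (values : List String) (aug_ents : List (List String)) (entity_slices : List (List Int)) : Prop :=
  (decide (entity_slices.length ≤ aug_ents.length) &&
    entity_slices.all (fun s => decide (2 ≤ s.length))) = true

instance (values : List String) (aug_ents : List (List String)) (entity_slices : List (List Int)) : Decidable (Pre_handle_orth values aug_ents entity_slices) := by unfold Pre_handle_orth; infer_instance

def pvWitness_handle_orth : List String × List (List String) × List (List Int) :=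
  (["a", "b", "c", "d"], [["X", "Y"], ["Z"]], [[1, 2], [3, 4]])

def Spec_handle_orth (values : List String) (aug_ents : List (List String)) (entity_slices : List (List Int)) (out : List String) : Prop := out = handle_orth_alt values aug_ents entity_slices
instance (values : List String) (aug_ents : List (List String)) (entity_slices : List (List Int)) (out : List String) : Decidable (Spec_handle_orth values aug_ents entity_slices out) := by unfold Spec_handle_orth; infer_instance

-- ===== CLAIM (what is proved, stated in full; the proofs are below) =====
def Claim_equal_handle_orth : Prop := ∀ (values : List String) (aug_ents : List (List String)) (entity_slices : List (List Int)), Dom_handle_orth values aug_ents entity_slices → Pre_handle_orth values aug_ents entity_slices → Spec_handle_orth values aug_ents entity_slices (handle_orth values aug_ents entity_slices)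

-- ===== LEMMAS AND PROOFS =====

theorem pvFoldAppend (l : List (List String)) :
    ∀ acc, l.foldl (fun acc p => acc ++ p) acc = acc ++ l.flatten := by
  induction l with
  | nil => intro acc; simp
  | cons p rest ih => intro acc; simp [List.foldl, ih (acc ++ p)]

-- after placement the splice walk just drops the rest of the replaced range
theorem pvSpliceT (ent : List String) :
    ∀ (pieces : List (List String)) (y : Int), 0 ≤ y →
    (pvSpliceGo ent pieces 0 y true).flatten = pieces.flatten.drop y.toNat := by
  intro pieces
  induction pieces with
  | nil => intro y _; simp [pvSpliceGo]
  | cons p rest ih =>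
    intro y hy
    rw [pvSpliceGo]
    by_cases hp : (p.length : Int) ≤ 0
    · rw [if_pos hp]
      have hp0 : p = [] := List.length_eq_zero_iff.mp (by omega)
      subst hp0
      simp only [List.length_nil, Nat.cast_zero, sub_zero, max_self]
      rw [max_eq_left hy]
      simp [ih y hy]
    · rw [if_neg hp]
      rw [max_eq_right (by omega : (0 : Int) - p.length ≤ 0)]
      rw [if_neg (lt_irrefl (0 : Int)), if_pos rfl]
      by_cases hy' : y < (p.length : Int)
      · rw [if_pos hy', max_eq_right (by omega : y - (p.length : Int) ≤ 0)]
        have hdp : (if 0 < y then PySem.List.slice p (some y) none else p)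
            = p.drop y.toNat := by
          by_cases h0 : 0 < y
          · rw [if_pos h0]; exact PySem.List.slice_from _ hy
          · have hy0 : y = 0 := by omega
            subst hy0; simp
        rw [hdp]
        simp only [List.nil_append, List.flatten_append, List.flatten_cons,
          List.append_nil]
        rw [ih 0 le_rfl]
        have e2 : List.drop y.toNat (p ++ rest.flatten)
            = List.drop y.toNat p ++ rest.flatten :=
          List.drop_append_of_le_length (by omega)
        simp [e2]
      · rw [if_neg hy', max_eq_left (by omega : (0 : Int) ≤ y - p.length)]
        simp only [List.nil_append, List.flatten_append, List.flatten_cons,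
          List.append_nil]
        rw [ih _ (by omega)]
        rw [List.drop_append, List.drop_eq_nil_of_le (by omega : p.length ≤ y.toNat)]
        have : y.toNat - p.length = (y - (p.length : Int)).toNat := by omega
        rw [this]
        simp

-- the splice walk performs exactly Python's slice assignment on the flattened table
theorem pvSpliceS (ent : List String) :
    ∀ (pieces : List (List String)) (x y : Int), 0 ≤ x → x ≤ y →
    (pvSpliceGo ent pieces x y false).flatten =
      pieces.flatten.take x.toNat ++ ent ++ pieces.flatten.drop y.toNat := by
  intro pieces
  induction pieces with
  | nil => intro x y _ _; simp [pvSpliceGo]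
  | cons p rest ih =>
    intro x y hx hxy
    rw [pvSpliceGo]
    by_cases hbranch : (p.length : Int) ≤ x
    · -- piece entirely before the replaced range
      rw [if_pos hbranch]
      rw [max_eq_left (by omega : (0 : Int) ≤ x - p.length),
        max_eq_left (by omega : (0 : Int) ≤ y - p.length)]
      simp only [List.flatten_cons]
      rw [ih _ _ (by omega) (by omega)]
      have e1 : List.take x.toNat (p ++ rest.flatten)
          = p ++ List.take ((x - (p.length : Int)).toNat) rest.flatten := by
        rw [List.take_append, List.take_of_length_le (by omega : p.length ≤ x.toNat)]
        have : x.toNat - p.length = (x - (p.length : Int)).toNat := by omega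
        rw [this]
      have e2 : List.drop y.toNat (p ++ rest.flatten)
          = List.drop ((y - (p.length : Int)).toNat) rest.flatten := by
        rw [List.drop_append, List.drop_eq_nil_of_le (by omega : p.length ≤ y.toNat)]
        have : y.toNat - p.length = (y - (p.length : Int)).toNat := by omega
        rw [this, List.nil_append]
      rw [e1, e2]
      simp
    · -- the replaced range starts inside this piece
      rw [if_neg hbranch]
      rw [max_eq_right (by omega : x - (p.length : Int) ≤ 0)]
      rw [if_neg (by decide : ¬ (false = true))]
      have htake : (if 0 < x then [PySem.List.slice p none (some x)] else []).flatten
          = p.take x.toNat := by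
        by_cases hx0 : 0 < x
        · rw [if_pos hx0]; simp [PySem.List.slice_to _ hx]
        · have hx00 : x = 0 := by omega
          subst hx00; simp
      by_cases hy' : y < (p.length : Int)
      · rw [if_pos hy', max_eq_right (by omega : y - (p.length : Int) ≤ 0)]
        have hdp : (if 0 < y then PySem.List.slice p (some y) none else p)
            = p.drop y.toNat := by
          by_cases h0 : 0 < y
          · rw [if_pos h0]; exact PySem.List.slice_from _ (by omega)
          · have hy0 : y = 0 := by omega
            subst hy0; simp
        rw [hdp]
        simp only [List.flatten_append, List.flatten_cons, List.flatten_nil,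
          List.append_nil, htake]
        rw [pvSpliceT ent rest 0 le_rfl]
        have e1 : List.take x.toNat (p ++ rest.flatten) = List.take x.toNat p :=
          List.take_append_of_le_length (by omega)
        have e2 : List.drop y.toNat (p ++ rest.flatten)
            = List.drop y.toNat p ++ rest.flatten :=
          List.drop_append_of_le_length (by omega)
        simp [e1, e2]
      · rw [if_neg hy', max_eq_left (by omega : (0 : Int) ≤ y - p.length)]
        simp only [List.flatten_append, List.flatten_cons, List.flatten_nil,
          List.append_nil, htake]
        rw [pvSpliceT ent rest _ (by omega)]
        have e1 : List.take x.toNat (p ++ rest.flatten) = List.take x.toNat p :=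
          List.take_append_of_le_length (by omega)
        have e2 : List.drop y.toNat (p ++ rest.flatten)
            = List.drop ((y - (p.length : Int)).toNat) rest.flatten := by
          rw [List.drop_append, List.drop_eq_nil_of_le (by omega : p.length ≤ y.toNat)]
          have : y.toNat - p.length = (y - (p.length : Int)).toNat := by omega
          rw [this, List.nil_append]
        simp [e1, e2]

-- main invariant: A's working list is the flattened piece table, and B's tracked length
-- is its length
theorem pvMain (F : List (List String)) :
    ∀ (slices : List (List Int)) (ents : List (List String)) (i : Nat)
      (pieces : List (List String)) (len ra : Int),
    F.drop i = ents → slices.length ≤ ents.length →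
    len = (pieces.flatten.length : Int) →
    handleOrthGo F slices i pieces.flatten ra =
      (handleOrthAltGo (ents.zip slices) pieces len ra).flatten := by
  intro slices
  induction slices with
  | nil => intro ents i pieces len ra _ _ _; simp [handleOrthGo, handleOrthAltGo]
  | cons s rest ih =>
    intro ents i pieces len ra hdrop hlen hlenv
    cases ents with
    | nil => simp at hlen
    | cons e ents' =>
      have hgetF : PySem.List.pyGet? F (i : Int) = some e := by
        rw [PySem.List.pyGet?_natCast]
        have : (F.drop i)[0]? = some e := by rw [hdrop]; rfl
        simpa using this
      have hdrop' : F.drop (i + 1) = ents' := by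
        have : F.drop (i + 1) = (F.drop i).drop 1 := by
          rw [List.drop_drop, Nat.add_comm]
        rw [this, hdrop]; rfl
      simp only [handleOrthGo, hgetF, Option.getD_some, List.zip_cons_cons, handleOrthAltGo]
      -- names for the raw and clamped bounds
      set s0 := (PySem.List.pyGet? s 0).getD 0 with hs0
      set s1 := (PySem.List.pyGet? s 1).getD 0 with hs1
      set n := pieces.flatten.length with hn
      set c1 := PySem.List.clampIdx n (s0 + ra) with hc1
      set c2 := PySem.List.clampIdx n (s1 + ra) with hc2
      have hcl1 : c1 ≤ n := PySem.List.clampIdx_le n (s0 + ra)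
      have hcl2 : c2 ≤ n := PySem.List.clampIdx_le n (s1 + ra)
      -- B's slice.indices bounds are A's clamped bounds (len.toNat = n)
      have hlt : len.toNat = n := by omega
      rw [hlt]
      have hbmax : (max ((c1 : Nat) : Int) ((c2 : Nat) : Int)) = ((max c1 c2 : Nat) : Int) := by
        push_cast; omega
      rw [hbmax]
      -- the spliced piece table flattens to A's slice assignment
      have hsplice : (pvSpliceGo e pieces ((c1 : Nat) : Int) ((max c1 c2 : Nat) : Int)
            false).flatten = pySliceAssign pieces.flatten (s0 + ra) (s1 + ra) e := by
        rw [pvSpliceS e pieces _ _ (by positivity) (by push_cast; omega)]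
        unfold pySliceAssign
        rw [← hn, ← hc1, ← hc2]
        simp
        omega
      rw [← hsplice]
      exact ih ents' (i + 1) _ _ _ hdrop' (by simpa using hlen)
        (by rw [hsplice]; unfold pySliceAssign
            rw [← hn, ← hc1, ← hc2]
            simp only [List.length_append, List.length_take, List.length_drop]
            push_cast
            omega)

-- ===== VERDICT (by name: the statement is the Claim_ definition above) =====
theorem handle_orth_spec : Claim_equal_handle_orth := by
  intro values aug_ents entity_slices _ hpre
  unfold Pre_handle_orth at hpre
  simp only [Bool.and_eq_true, decide_eq_true_eq] at hpre
  obtain ⟨hlen, -⟩ := hpre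
  unfold Spec_handle_orth handle_orth handle_orth_alt
  rw [pvFoldAppend, List.nil_append]
  have hmain := pvMain aug_ents entity_slices aug_ents 0 [values] (values.length : Int) 0
    rfl hlen (by simp)
  simpa using hmain
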